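-- pv_equiv track=rewrite | github.com/blegloannec/CodeProblems | CodeChef/Contests/NovemberChallenge17/clrl.py | check
-- ===== SOURCE A (Python) =====
-- def check(A,R):
--     inf,sup = 1,10**9
--     for a in A:
--         if a>R:
--             if a>sup:
--                 return False
--             sup = a
--         else:
--             if a<inf:
--                 return False
--             inf = a
--     return True
-- ===== SOURCE B (Python) =====
-- def check(A, R):
--     lowers = [a for a in A if a <= R]
--     uppers = [a for a in A if a > R]
--     if uppers and uppers[0] > 10**9:
--         return False
--     if lowers and lowers[0] < 1:
--         return False
--     if any(x < y for x, y in zip(uppers, uppers[1:])):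
--         return False
--     if any(x > y for x, y in zip(lowers, lowers[1:])):
--         return False
--     return True
-- ===== Notes on version B (the rewrite author's own statement) =====
-- stated objective: alternative
-- what changed: Replaces the interleaved single-pass two-bound state machine with a partition into lowers/uppers followed by separate first-element bound checks and adjacent-pair monotonicity checks.
import Mathlib
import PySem

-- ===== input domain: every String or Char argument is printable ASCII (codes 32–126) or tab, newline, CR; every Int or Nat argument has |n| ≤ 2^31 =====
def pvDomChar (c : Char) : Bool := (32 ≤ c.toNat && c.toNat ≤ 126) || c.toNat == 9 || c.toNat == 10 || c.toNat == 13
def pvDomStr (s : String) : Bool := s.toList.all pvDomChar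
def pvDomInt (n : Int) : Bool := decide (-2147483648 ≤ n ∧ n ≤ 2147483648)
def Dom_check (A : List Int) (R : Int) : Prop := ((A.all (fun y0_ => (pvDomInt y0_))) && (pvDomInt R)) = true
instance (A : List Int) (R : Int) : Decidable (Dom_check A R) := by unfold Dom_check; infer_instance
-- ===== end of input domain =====

-- B replaces A's single-pass two-bound state machine by a partition into lowers/uppers
-- plus separate first-element bound checks and adjacent-pair monotonicity checks (alternative decomposition).

-- ===== PORT A =====
-- the for-loop of A, carrying the (inf, sup) state
def checkLoop (R : Int) (inf sup : Int) : List Int → Bool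
  | [] => true
  | a :: t =>
    if a > R then
      if a > sup then false else checkLoop R inf a t
    else
      if a < inf then false else checkLoop R a sup t

def check (A : List Int) (R : Int) : Bool := checkLoop R 1 (10 ^ 9) A

-- ===== PORT B =====
def check_alt (A : List Int) (R : Int) : Bool :=
  let lowers := A.filter (fun a => decide (a ≤ R))
  let uppers := A.filter (fun a => decide (a > R))
  if (match uppers with | [] => false | x :: _ => decide (x > 10 ^ 9)) then false
  else if (match lowers with | [] => false | x :: _ => decide (x < 1)) then false
  else if (uppers.zip uppers.tail).any (fun p => decide (p.1 < p.2)) then false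
  else if (lowers.zip lowers.tail).any (fun p => decide (p.1 > p.2)) then false
  else true

-- ===== PRECONDITION & SPEC =====
def Spec_check (A : List Int) (R : Int) (out : Bool) : Prop := out = check_alt A R
instance (A : List Int) (R : Int) (out : Bool) : Decidable (Spec_check A R out) := by unfold Spec_check; infer_instance

-- ===== CLAIM (what is proved, stated in full; the proofs are below) =====
def Claim_equal_check : Prop := ∀ (A : List Int) (R : Int), Dom_check A R → Spec_check A R (check A R)

-- ===== LEMMAS AND PROOFS =====

-- "the upper subsequence, starting from bound sup, never rises": A's sup-side invariant
def upOK (sup : Int) : List Int → Bool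
  | [] => true
  | x :: t => decide (x ≤ sup) && upOK x t

-- "the lower subsequence, starting from bound inf, never falls": A's inf-side invariant
def loOK (inf : Int) : List Int → Bool
  | [] => true
  | x :: t => decide (inf ≤ x) && loOK x t

theorem checkLoop_eq (R : Int) : ∀ (A : List Int) (inf sup : Int),
    checkLoop R inf sup A
      = (upOK sup (A.filter (fun a => decide (a > R))) &&
         loOK inf (A.filter (fun a => decide (a ≤ R)))) := by
  intro A
  induction A with
  | nil => intro inf sup; simp [checkLoop, upOK, loOK]
  | cons a t ih =>
    intro inf sup
    by_cases h : a > R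
    · have h2 : ¬ a ≤ R := by omega
      by_cases hs : a > sup
      · simp [checkLoop, h, hs, h2, upOK, show ¬ a ≤ sup by omega]
      · simp [checkLoop, h, hs, h2, upOK, show a ≤ sup by omega, ih]
    · have h2 : a ≤ R := by omega
      by_cases hi : a < inf
      · simp [checkLoop, h, hi, h2, loOK, show ¬ inf ≤ a by omega]
      · simp [checkLoop, h, hi, h2, loOK, show inf ≤ a by omega, ih]

theorem upOK_eq : ∀ (l : List Int) (sup : Int),
    upOK sup l
      = ((!(match l with | [] => false | x :: _ => decide (x > sup))) &&
         !((l.zip l.tail).any (fun p => decide (p.1 < p.2)))) := by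
  intro l
  induction l with
  | nil => intro sup; simp [upOK]
  | cons x t ih =>
    intro sup
    cases t with
    | nil =>
        simp only [upOK, List.tail_cons, List.zip_nil_right, List.any_nil, Bool.not_false,
          Bool.and_true, gt_iff_lt]
        rw [← decide_not, decide_eq_decide]
        omega
    | cons y t' =>
      have := ih x
      simp [upOK] at this ⊢
      rw [this]
      by_cases h1 : x ≤ sup <;> by_cases h2 : x < y <;>
        simp [h1, h2]

theorem loOK_eq : ∀ (l : List Int) (inf : Int),
    loOK inf l
      = ((!(match l with | [] => false | x :: _ => decide (x < inf))) &&
         !((l.zip l.tail).any (fun p => decide (p.1 > p.2)))) := by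
  intro l
  induction l with
  | nil => intro inf; simp [loOK]
  | cons x t ih =>
    intro inf
    cases t with
    | nil =>
        simp only [loOK, List.tail_cons, List.zip_nil_right, List.any_nil, Bool.not_false,
          Bool.and_true, gt_iff_lt]
        rw [← decide_not, decide_eq_decide]
        omega
    | cons y t' =>
      have := ih x
      simp [loOK] at this ⊢
      rw [this]
      by_cases h1 : inf ≤ x <;> by_cases h2 : y < x <;>
        simp [h1, h2]

-- ===== VERDICT (by name: the statement is the Claim_ definition above) =====
theorem pv_bool4 : ∀ a b c d : Bool,
    ((!a && !c) && (!b && !d))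
      = (if a then false else if b then false else if c then false else if d then false else true) := by
  decide

theorem check_spec : Claim_equal_check := by
  intro A R _
  unfold Spec_check check check_alt
  rw [checkLoop_eq, upOK_eq, loOK_eq]
  exact pv_bool4 _ _ _ _
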